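-- pv_equiv track=rewrite | github.com/Random0617/Project02_LogicalAgent | main.py | Stench
-- ===== SOURCE A (Python) =====
-- def Stench(matrix):
--     # Given a two-dimensional matrix of rooms, return a two-dimensional boolean list
--     # of whether the room has a Breeze (is directly adjacent to a pit square)
--     ARRAY_SIZE = len(matrix)
--     resulting_array = [[0 for i in range(ARRAY_SIZE)] for j in range(ARRAY_SIZE)]
--     for i in range(ARRAY_SIZE):
--         for k in range(ARRAY_SIZE):
--             if ((i - 1 >= 0 and matrix[i - 1][k] == 'W')
--                     or (i + 1 < ARRAY_SIZE and matrix[i + 1][k] == 'W')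
--                     or (k - 1 >= 0 and matrix[i][k - 1] == 'W')
--                     or (k + 1 < ARRAY_SIZE and matrix[i][k + 1] == 'W')):
--                 resulting_array[i][k] = resulting_array[i][k] + 1
--     return resulting_array
-- ===== SOURCE B (Python) =====
-- def Stench(matrix):
--     # Scatter: for each 'W' cell, mark its in-bounds orthogonal neighbors with 1.
--     n = len(matrix)
--     result = [[0] * n for _ in range(n)]
--     for i in range(n):
--         for j in range(n):
--             if matrix[i][j] == 'W':
--                 if i > 0:
--                     result[i - 1][j] = 1
--                 if i + 1 < n:
--                     result[i + 1][j] = 1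
--                 if j > 0:
--                     result[i][j - 1] = 1
--                 if j + 1 < n:
--                     result[i][j + 1] = 1
--     return result
-- ===== Notes on version B (the rewrite author's own statement) =====
-- stated objective: alternative
-- what changed: Replaces A's gather (every cell tests its four neighbors for 'W') with a scatter (only each 'W' cell writes 1 into its in-bounds neighbors of the pre-allocated zero grid).
-- outside the precondition, e.g. on Stench([[]]): A returns [[0]], B raises IndexError
import Mathlib
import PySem

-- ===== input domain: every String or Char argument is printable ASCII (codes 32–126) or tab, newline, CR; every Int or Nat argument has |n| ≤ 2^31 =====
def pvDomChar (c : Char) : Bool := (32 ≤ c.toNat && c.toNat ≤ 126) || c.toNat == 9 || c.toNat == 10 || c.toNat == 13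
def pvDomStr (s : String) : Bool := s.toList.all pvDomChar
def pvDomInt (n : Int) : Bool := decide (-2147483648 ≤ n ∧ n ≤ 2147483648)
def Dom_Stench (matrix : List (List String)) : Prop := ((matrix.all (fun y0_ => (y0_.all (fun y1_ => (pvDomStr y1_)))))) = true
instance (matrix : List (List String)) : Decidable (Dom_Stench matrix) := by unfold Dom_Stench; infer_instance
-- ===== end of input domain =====

-- B replaces A's per-cell gather over the four neighbors by a scatter from each 'W' cell;
-- same cost, different traversal. Equivalence is on the return value.

-- matrix[i][j] read (under Pre_ all reads both Pythons make are in range)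
def getS (m : List (List String)) (i j : Nat) : String := (m.getD i []).getD j ""
-- resulting_array[r][c] read
def entryE (res : List (List Int)) (r c : Nat) : Int := (res.getD r []).getD c 0
-- resulting_array[i][k] = v
def updE (res : List (List Int)) (i k : Nat) (v : Int) : List (List Int) :=
  res.set i ((res.getD i []).set k v)

-- ===== PORT A =====
def stenchCond (m : List (List String)) (n i k : Nat) : Bool :=
  (decide (1 ≤ i) && (getS m (i - 1) k == "W"))
  || (decide (i + 1 < n) && (getS m (i + 1) k == "W"))
  || (decide (1 ≤ k) && (getS m i (k - 1) == "W"))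
  || (decide (k + 1 < n) && (getS m i (k + 1) == "W"))

def Stench (matrix : List (List String)) : List (List Int) :=
  let n := matrix.length
  let res0 := (List.range n).map (fun _ => (List.range n).map (fun _ => (0 : Int)))
  (List.range n).foldl (fun res i =>
    (List.range n).foldl (fun res k =>
      if stenchCond matrix n i k then updE res i k (entryE res i k + 1) else res) res) res0

-- ===== PORT B =====
def markW (n i j : Nat) (res : List (List Int)) : List (List Int) :=
  let res1 := if 0 < i then updE res (i - 1) j 1 else res
  let res2 := if i + 1 < n then updE res1 (i + 1) j 1 else res1
  let res3 := if 0 < j then updE res2 i (j - 1) 1 else res2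
  if j + 1 < n then updE res3 i (j + 1) 1 else res3

def Stench_alt (matrix : List (List String)) : List (List Int) :=
  let n := matrix.length
  (List.range n).foldl (fun res i =>
    (List.range n).foldl (fun res j =>
      if getS matrix i j == "W" then markW n i j res else res) res)
    ((List.range n).map (fun _ => List.replicate n (0 : Int)))

-- ===== PRECONDITION & SPEC =====
-- Pre_ excludes ragged inputs (some row shorter than the grid): on almost all of those Python A
-- raises IndexError, and on the few degenerate ones where 'or' short-circuiting lets A return
-- (e.g. [[]]) B's natural scatter raises instead.
def Pre_Stench (matrix : List (List String)) : Prop :=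
  ∀ row ∈ matrix, matrix.length ≤ row.length
instance (matrix : List (List String)) : Decidable (Pre_Stench matrix) := by
  unfold Pre_Stench; infer_instance

def pvWitness_Stench : List (List String) := [["W", "."], [".", "."]]

def Spec_Stench (matrix : List (List String)) (out : List (List Int)) : Prop := out = Stench_alt matrix
instance (matrix : List (List String)) (out : List (List Int)) : Decidable (Spec_Stench matrix out) := by unfold Spec_Stench; infer_instance

-- ===== CLAIM (what is proved, stated in full; the proofs are below) =====
def Claim_equal_Stench : Prop := ∀ (matrix : List (List String)), Dom_Stench matrix → Pre_Stench matrix → Spec_Stench matrix (Stench matrix)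

-- ===== LEMMAS AND PROOFS =====

-- shape invariant: n rows, each of length n
def Sh (n : Nat) (res : List (List Int)) : Prop :=
  res.length = n ∧ ∀ row ∈ res, row.length = n

-- does processing 'W'-cell (i,j) write into entry (r,c)?
def targets (n i j r c : Nat) : Bool :=
  (decide (0 < i) && decide (r = i - 1 ∧ c = j))
  || (decide (i + 1 < n) && decide (r = i + 1 ∧ c = j))
  || (decide (0 < j) && decide (r = i ∧ c = j - 1))
  || (decide (j + 1 < n) && decide (r = i ∧ c = j + 1))

-- did some cell (i,j) with j < t in row i carry 'W' and target (r,c)?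
def hitRow (m : List (List String)) (n i t r c : Nat) : Bool :=
  (List.range t).any (fun j => (getS m i j == "W") && targets n i j r c)

def hitAll (m : List (List String)) (n t r c : Nat) : Bool :=
  (List.range t).any (fun i => hitRow m n i n r c)

lemma sh_init (n : Nat) (f : Nat → List Int) (hf : ∀ x, (f x).length = n) :
    Sh n ((List.range n).map f) := by
  refine ⟨by simp, ?_⟩
  intro row hrow
  simp only [List.mem_map] at hrow
  obtain ⟨x, _, rfl⟩ := hrow
  exact hf x

lemma entryE_init (n : Nat) (f : Nat → List Int) (hf : ∀ x, f x = List.replicate n 0)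
    (r c : Nat) : entryE ((List.range n).map f) r c = 0 := by
  unfold entryE
  simp only [List.getD_eq_getElem?_getD, List.getElem?_map]
  rcases lt_or_ge r n with h | h
  · rw [List.getElem?_range h]
    simp [hf, List.getElem?_replicate]
    split <;> rfl
  · rw [show (List.range n)[r]? = none from List.getElem?_eq_none (by simpa using h)]
    rfl

lemma sh_updE {n : Nat} {res : List (List Int)} (h : Sh n res) (i k : Nat) (hi : i < n)
    (v : Int) : Sh n (updE res i k v) := by
  obtain ⟨hlen, hrows⟩ := h
  refine ⟨by simp [updE, hlen], ?_⟩
  intro row hrow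
  rcases List.mem_or_eq_of_mem_set hrow with h' | h'
  · exact hrows _ h'
  · subst h'
    rw [List.length_set]
    have hi' : i < res.length := by omega
    rw [List.getD_eq_getElem _ _ hi']
    exact hrows _ (List.getElem_mem hi')

lemma entryE_updE {n : Nat} {res : List (List Int)} (h : Sh n res) {i k : Nat}
    (hi : i < n) (hk : k < n) (v : Int) (r c : Nat) :
    entryE (updE res i k v) r c = if r = i ∧ c = k then v else entryE res r c := by
  obtain ⟨hlen, hrows⟩ := h
  have hi' : i < res.length := by omega
  have hk' : k < (res.getD i []).length := by
    rw [List.getD_eq_getElem _ _ hi']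
    rw [hrows _ (List.getElem_mem hi')]; exact hk
  unfold entryE updE
  simp only [List.getD_eq_getElem?_getD] at hk' ⊢
  by_cases hr : r = i
  · subst hr
    rw [List.getElem?_set_self hi']
    simp only [Option.getD_some]
    by_cases hc : c = k
    · subst hc
      rw [List.getElem?_set_self hk']
      simp
    · rw [List.getElem?_set_ne (Ne.symm hc)]
      simp [hc]
  · rw [List.getElem?_set_ne (fun h => hr h.symm)]
    simp [hr]

-- conditional update: shape (the guard implies the row bound)
lemma sh_condUpd {n : Nat} {res : List (List Int)} (h : Sh n res) (i k : Nat)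
    (p : Prop) [Decidable p] (hpi : p → i < n) : Sh n (if p then updE res i k 1 else res) := by
  split
  · next hp => exact sh_updE h i k (hpi hp) 1
  · exact h

-- conditional update: entries
lemma entryE_condUpd {n : Nat} {res : List (List Int)} (h : Sh n res) {i k : Nat}
    (p : Prop) [Decidable p] (hpi : p → i < n) (hpk : p → k < n) (r c : Nat) :
    entryE (if p then updE res i k 1 else res) r c
      = if p ∧ r = i ∧ c = k then 1 else entryE res r c := by
  by_cases hp : p
  · simp only [hp, if_true, true_and]
    exact entryE_updE h (hpi hp) (hpk hp) 1 r c
  · simp [hp]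

lemma sh_markW {n : Nat} {res : List (List Int)} (h : Sh n res) {i j : Nat}
    (hi : i < n) (_hj : j < n) : Sh n (markW n i j res) := by
  unfold markW
  apply sh_condUpd _ _ _ _ (fun _ => hi)
  apply sh_condUpd _ _ _ _ (fun _ => hi)
  apply sh_condUpd _ _ _ _ (fun hp => hp)
  exact sh_condUpd h _ _ _ (fun _ => by omega)

lemma entryE_markW {n : Nat} {res : List (List Int)} (h : Sh n res) {i j : Nat}
    (hi : i < n) (hj : j < n) (r c : Nat) :
    entryE (markW n i j res) r c = if targets n i j r c then 1 else entryE res r c := by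
  have h1 : Sh n (if 0 < i then updE res (i - 1) j 1 else res) :=
    sh_condUpd h _ _ _ (fun _ => by omega)
  have h2 : Sh n (if i + 1 < n then updE (if 0 < i then updE res (i - 1) j 1 else res) (i + 1) j 1
      else (if 0 < i then updE res (i - 1) j 1 else res)) :=
    sh_condUpd h1 _ _ _ (fun hp => hp)
  have h3 := sh_condUpd h2 i (j - 1) (0 < j) (fun _ => hi)
  simp only [markW]
  rw [entryE_condUpd h3 _ (fun _ => hi) (fun hp => hp)]
  rw [entryE_condUpd h2 _ (fun _ => hi) (fun _ => by omega)]
  rw [entryE_condUpd h1 _ (fun hp => hp) (fun _ => hj)]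
  rw [entryE_condUpd h _ (fun _ => by omega) (fun _ => hj)]
  by_cases ht : targets n i j r c = true
  · rw [if_pos ht]
    simp only [targets, Bool.or_eq_true, Bool.and_eq_true, decide_eq_true_eq] at ht
    split_ifs <;> try rfl
    exfalso; omega
  · rw [if_neg ht]
    simp only [targets, Bool.or_eq_true, Bool.and_eq_true, decide_eq_true_eq] at ht
    split_ifs <;> try rfl
    all_goals (exfalso; omega)

-- B's inner loop over row i
lemma innerB (m : List (List String)) (n i : Nat) (hi : i < n) :
    ∀ t, t ≤ n → ∀ res, Sh n res →
      Sh n ((List.range t).foldl (fun res j =>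
          if getS m i j == "W" then markW n i j res else res) res) ∧
      ∀ r c, entryE ((List.range t).foldl (fun res j =>
          if getS m i j == "W" then markW n i j res else res) res) r c
        = if hitRow m n i t r c then 1 else entryE res r c := by
  intro t
  induction t with
  | zero => intro _ res hres; exact ⟨hres, by simp [hitRow]⟩
  | succ t ih =>
    intro ht res hres
    obtain ⟨hsh, he⟩ := ih (by omega) res hres
    rw [List.range_succ, List.foldl_append]
    simp only [List.foldl_cons, List.foldl_nil]
    have htn : t < n := by omega
    constructor
    · split
      · exact sh_markW hsh hi htn
      · exact hsh
    · intro r c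
      by_cases hw : getS m i t == "W"
      · rw [if_pos hw, entryE_markW hsh hi htn]
        simp only [he]
        have : hitRow m n i (t + 1) r c
            = (hitRow m n i t r c || targets n i t r c) := by
          simp [hitRow, List.range_succ, hw]
        rw [this]
        by_cases h1 : targets n i t r c <;> by_cases h2 : hitRow m n i t r c <;>
          simp [h1, h2]
      · rw [if_neg hw]
        rw [he]
        have hwf : (getS m i t == "W") = false := by
          simpa using hw
        have : hitRow m n i (t + 1) r c = hitRow m n i t r c := by
          simp [hitRow, List.range_succ, hwf]
        rw [this]

-- B's outer loop
lemma outerB (m : List (List String)) (n : Nat) :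
    ∀ t, t ≤ n → ∀ res, Sh n res →
      Sh n ((List.range t).foldl (fun res i =>
          (List.range n).foldl (fun res j =>
            if getS m i j == "W" then markW n i j res else res) res) res) ∧
      ∀ r c, entryE ((List.range t).foldl (fun res i =>
          (List.range n).foldl (fun res j =>
            if getS m i j == "W" then markW n i j res else res) res) res) r c
        = if hitAll m n t r c then 1 else entryE res r c := by
  intro t
  induction t with
  | zero => intro _ res hres; exact ⟨hres, by simp [hitAll]⟩
  | succ t ih =>
    intro ht res hres
    obtain ⟨hsh, he⟩ := ih (by omega) res hres
    rw [List.range_succ, List.foldl_append]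
    simp only [List.foldl_cons, List.foldl_nil]
    obtain ⟨hsh', he'⟩ := innerB m n t (by omega) n (le_refl n) _ hsh
    refine ⟨hsh', ?_⟩
    intro r c
    rw [he', he]
    have : hitAll m n (t + 1) r c = (hitAll m n t r c || hitRow m n t n r c) := by
      simp [hitAll, List.range_succ]
    rw [this]
    by_cases h1 : hitRow m n t n r c <;> by_cases h2 : hitAll m n t r c <;> simp [h1, h2]

-- A's inner loop over row i
lemma innerA (m : List (List String)) (n i : Nat) (hi : i < n) :
    ∀ t, t ≤ n → ∀ res, Sh n res →
      Sh n ((List.range t).foldl (fun res k =>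
          if stenchCond m n i k then updE res i k (entryE res i k + 1) else res) res) ∧
      ∀ r c, entryE ((List.range t).foldl (fun res k =>
          if stenchCond m n i k then updE res i k (entryE res i k + 1) else res) res) r c
        = if r = i ∧ c < t ∧ stenchCond m n i c = true then entryE res r c + 1
          else entryE res r c := by
  intro t
  induction t with
  | zero => intro _ res hres; exact ⟨hres, by simp⟩
  | succ t ih =>
    intro ht res hres
    obtain ⟨hsh, he⟩ := ih (by omega) res hres
    rw [List.range_succ, List.foldl_append]
    simp only [List.foldl_cons, List.foldl_nil]
    have htn : t < n := by omega
    constructor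
    · split
      · exact sh_updE hsh i t hi _
      · exact hsh
    · intro r c
      by_cases hcond : stenchCond m n i t = true
      · rw [if_pos hcond, entryE_updE hsh hi htn, he i t, he r c,
          if_neg (show ¬(i = i ∧ t < t ∧ stenchCond m n i t = true) from
            fun h => Nat.lt_irrefl t h.2.1)]
        by_cases hrc : r = i ∧ c = t
        · obtain ⟨rfl, rfl⟩ := hrc
          simp [hcond]
        · rw [if_neg hrc]
          by_cases hcase : r = i ∧ c < t ∧ stenchCond m n i c = true
          · rw [if_pos hcase, if_pos ⟨hcase.1, by omega, hcase.2.2⟩]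
          · have hneg : ¬(r = i ∧ c < t + 1 ∧ stenchCond m n i c = true) := by
              rintro ⟨h1, h2, h3⟩
              have hct : c ≠ t := fun hc => hrc ⟨h1, hc⟩
              exact hcase ⟨h1, by omega, h3⟩
            rw [if_neg hcase, if_neg hneg]
      · rw [if_neg hcond, he r c]
        by_cases hcase : r = i ∧ c < t ∧ stenchCond m n i c = true
        · rw [if_pos hcase, if_pos ⟨hcase.1, by omega, hcase.2.2⟩]
        · have hneg : ¬(r = i ∧ c < t + 1 ∧ stenchCond m n i c = true) := by
            rintro ⟨h1, h2, h3⟩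
            have hct : c ≠ t := fun hc => by subst hc; exact hcond h3
            exact hcase ⟨h1, by omega, h3⟩
          rw [if_neg hcase, if_neg hneg]

-- A's outer loop
lemma outerA (m : List (List String)) (n : Nat) :
    ∀ t, t ≤ n → ∀ res, Sh n res →
      Sh n ((List.range t).foldl (fun res i =>
          (List.range n).foldl (fun res k =>
            if stenchCond m n i k then updE res i k (entryE res i k + 1) else res) res) res) ∧
      ∀ r c, entryE ((List.range t).foldl (fun res i =>
          (List.range n).foldl (fun res k =>
            if stenchCond m n i k then updE res i k (entryE res i k + 1) else res) res) res) r c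
        = if r < t ∧ c < n ∧ stenchCond m n r c = true then entryE res r c + 1
          else entryE res r c := by
  intro t
  induction t with
  | zero => intro _ res hres; exact ⟨hres, by simp⟩
  | succ t ih =>
    intro ht res hres
    obtain ⟨hsh, he⟩ := ih (by omega) res hres
    rw [List.range_succ, List.foldl_append]
    simp only [List.foldl_cons, List.foldl_nil]
    obtain ⟨hsh', he'⟩ := innerA m n t (by omega) n (le_refl n) _ hsh
    refine ⟨hsh', ?_⟩
    intro r c
    rw [he' r c, he r c]
    by_cases ha : r = t ∧ c < n ∧ stenchCond m n t c = true
    · obtain ⟨rfl, hc, hcond⟩ := ha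
      rw [if_pos ⟨rfl, hc, hcond⟩, if_neg (fun h => Nat.lt_irrefl r h.1),
        if_pos ⟨by omega, hc, hcond⟩]
    · rw [if_neg ha]
      by_cases hcase : r < t ∧ c < n ∧ stenchCond m n r c = true
      · rw [if_pos hcase, if_pos ⟨by omega, hcase.2.1, hcase.2.2⟩]
      · have hneg : ¬(r < t + 1 ∧ c < n ∧ stenchCond m n r c = true) := by
          rintro ⟨h1, h2, h3⟩
          rcases Nat.lt_succ_iff_lt_or_eq.1 h1 with h' | h'
          · exact hcase ⟨h', h2, h3⟩
          · subst h'; exact ha ⟨rfl, h2, h3⟩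
        rw [if_neg hcase, if_neg hneg]

-- the gather condition and the scatter hit coincide
lemma cond_iff_hit (m : List (List String)) (n r c : Nat) :
    (r < n ∧ c < n ∧ stenchCond m n r c = true) ↔ hitAll m n n r c = true := by
  simp only [hitAll, hitRow, List.any_eq_true, List.mem_range, Bool.and_eq_true,
    beq_iff_eq, targets, Bool.or_eq_true, decide_eq_true_eq, stenchCond]
  constructor
  · rintro ⟨hr, hc, hcond⟩
    rcases hcond with ((⟨h1, hW⟩ | ⟨h1, hW⟩) | ⟨h1, hW⟩) | ⟨h1, hW⟩
    · exact ⟨r - 1, by omega, c, hc, hW, Or.inl (Or.inl (Or.inr ⟨by omega, by omega, rfl⟩))⟩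
    · exact ⟨r + 1, h1, c, hc, hW, Or.inl (Or.inl (Or.inl ⟨by omega, by omega, rfl⟩))⟩
    · exact ⟨r, hr, c - 1, by omega, hW, Or.inr ⟨by omega, rfl, by omega⟩⟩
    · exact ⟨r, hr, c + 1, h1, hW, Or.inl (Or.inr ⟨by omega, rfl, by omega⟩)⟩
  · rintro ⟨i, hi, j, hj, hW, ht⟩
    rcases ht with ((⟨h1, h2, h3⟩ | ⟨h1, h2, h3⟩) | ⟨h1, h2, h3⟩) | ⟨h1, h2, h3⟩
    · -- written into (i-1, j): gather disjunct "below is W"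
      subst h3
      have hi' : i = r + 1 := by omega
      subst hi'
      exact ⟨by omega, hj, Or.inl (Or.inl (Or.inr ⟨by omega, hW⟩))⟩
    · -- written into (i+1, j): gather disjunct "above is W"
      subst h2; subst h3
      exact ⟨by omega, hj, Or.inl (Or.inl (Or.inl ⟨by omega, by simpa using hW⟩))⟩
    · -- written into (i, j-1): gather disjunct "right is W"
      subst h2
      have hj' : j = c + 1 := by omega
      subst hj'
      exact ⟨hi, by omega, Or.inr ⟨hj, hW⟩⟩
    · -- written into (i, j+1): gather disjunct "left is W"
      subst h2; subst h3
      exact ⟨hi, by omega, Or.inl (Or.inr ⟨by omega, by simpa using hW⟩)⟩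

lemma getElem_eq_entryE {n : Nat} {res : List (List Int)} (_h : Sh n res)
    {r c : Nat} (hr : r < res.length) (hc : c < res[r].length) :
    res[r][c] = entryE res r c := by
  unfold entryE
  rw [List.getD_eq_getElem _ _ hr, List.getD_eq_getElem _ _ hc]

theorem Stench_spec : Claim_equal_Stench := by
  intro matrix _ _
  unfold Spec_Stench Stench Stench_alt
  simp only []
  set n := matrix.length with hn
  have hshA0 : Sh n ((List.range n).map (fun _ => (List.range n).map (fun _ => (0 : Int)))) :=
    sh_init n _ (fun _ => by simp)
  have hshB0 : Sh n ((List.range n).map (fun _ => List.replicate n (0 : Int))) :=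
    sh_init n _ (fun _ => by simp)
  obtain ⟨hshA, heA⟩ := outerA matrix n n (le_refl n) _ hshA0
  obtain ⟨hshB, heB⟩ := outerB matrix n n (le_refl n) _ hshB0
  -- pointwise values
  have hvA : ∀ r c, entryE ((List.range n).foldl (fun res i =>
      (List.range n).foldl (fun res k =>
        if stenchCond matrix n i k then updE res i k (entryE res i k + 1) else res) res)
      ((List.range n).map (fun _ => (List.range n).map (fun _ => (0 : Int))))) r c
      = if r < n ∧ c < n ∧ stenchCond matrix n r c = true then 1 else 0 := by
    intro r c
    rw [heA r c]
    rw [entryE_init n _ (fun _ => by simp [List.map_const']) r c]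
    split <;> rfl
  have hvB : ∀ r c, entryE ((List.range n).foldl (fun res i =>
      (List.range n).foldl (fun res j =>
        if getS matrix i j == "W" then markW n i j res else res) res)
      ((List.range n).map (fun _ => List.replicate n (0 : Int)))) r c
      = if hitAll matrix n n r c then 1 else 0 := by
    intro r c
    rw [heB r c, entryE_init n _ (fun _ => rfl) r c]
  apply List.ext_getElem
  · exact hshA.1.trans hshB.1.symm
  · intro r hr1 hr2
    apply List.ext_getElem
    · rw [hshA.2 _ (List.getElem_mem hr1), hshB.2 _ (List.getElem_mem hr2)]
    · intro c hc1 hc2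
      rw [getElem_eq_entryE hshA hr1 hc1, getElem_eq_entryE hshB hr2 hc2]
      rw [hvA r c, hvB r c]
      by_cases hh : hitAll matrix n n r c = true
      · rw [if_pos hh, if_pos ((cond_iff_hit matrix n r c).2 hh)]
      · rw [if_neg hh]
        rw [if_neg (fun hcon => hh ((cond_iff_hit matrix n r c).1 hcon))]
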